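-- pv_equiv track=rewrite | github.com/Arnav-Purushotam-CUBoulder/firefly-pipeline | temporary code folder/tmp data analysis/day_v3_param_sweep_experiment.py | _best_window
-- ===== SOURCE A (Python) =====
-- def _best_window(frames: list[int], window: int) -> tuple[int, int]:
--     frames = sorted(int(t) for t in frames)
--     best_start = frames[0]
--     best_count = -1
--     j = 0
--     for i, t0 in enumerate(frames):
--         while j < len(frames) and frames[j] < t0 + window:
--             j += 1
--         count = j - i
--         if count > best_count:
--             best_start = t0
--             best_count = count
--     return best_start, best_count
-- ===== SOURCE B (Python) =====
-- from bisect import bisect_left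
--
--
-- def _best_window(frames: list[int], window: int) -> tuple[int, int]:
--     frames = sorted(int(t) for t in frames)
--     best_start = frames[0]
--     best_count = -1
--     for i, t0 in enumerate(frames):
--         count = bisect_left(frames, t0 + window) - i
--         if count > best_count:
--             best_start = t0
--             best_count = count
--     return best_start, best_count
-- ===== Notes on version B (the rewrite author's own statement) =====
-- stated objective: idiomatic
-- what changed: Replaces the stateful two-pointer sweep (a j pointer advanced by an inner while loop) with a stateless per-start binary-search query bisect_left(frames, t0 + window) - i.
import Mathlib
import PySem

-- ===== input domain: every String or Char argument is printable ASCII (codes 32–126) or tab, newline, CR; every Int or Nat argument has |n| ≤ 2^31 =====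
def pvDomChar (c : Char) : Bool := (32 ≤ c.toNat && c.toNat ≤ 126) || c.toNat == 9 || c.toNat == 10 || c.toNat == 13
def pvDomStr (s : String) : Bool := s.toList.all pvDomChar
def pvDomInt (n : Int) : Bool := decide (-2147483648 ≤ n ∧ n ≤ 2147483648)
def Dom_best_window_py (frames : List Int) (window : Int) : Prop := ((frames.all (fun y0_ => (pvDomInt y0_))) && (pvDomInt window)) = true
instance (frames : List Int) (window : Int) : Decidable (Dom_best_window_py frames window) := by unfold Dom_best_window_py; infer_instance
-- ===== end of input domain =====

-- B replaces A's stateful two-pointer sweep (j pointer + inner while loop) with a stateless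
-- per-start bisect_left query; same sort and best-tracking, proved to return identical pairs.


-- ===== PORT A =====
-- the inner 'while j < len(frames) and frames[j] < t0 + window: j += 1'
def pvAdvance (s : List Int) (thr : Int) (j : Nat) : Nat :=
  if h : j < s.length ∧ s[j]! < thr then pvAdvance s thr (j + 1) else j
  termination_by s.length - j
  decreasing_by omega

def best_window_py (frames : List Int) (window : Int) : Int × Int :=
  let s := PySem.List.sorted frames (fun t => t)
  -- frames[0]: none = IndexError on the empty list, excluded by Pre_
  let best_start := (PySem.List.pyGet? s 0).getD 0
  let r := (PySem.List.enumerate s).foldl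
    (fun (st : Int × Int × Nat) (p : Int × Int) =>
      let j := pvAdvance s (p.2 + window) st.2.2
      let count : Int := (j : Int) - p.1
      if count > st.2.1 then (p.2, count, j) else (st.1, st.2.1, j))
    (best_start, -1, 0)
  (r.1, r.2.1)

-- ===== PORT B =====
def best_window_py_alt (frames : List Int) (window : Int) : Int × Int :=
  let s := PySem.List.sorted frames (fun t => t)
  let best_start := (PySem.List.pyGet? s 0).getD 0
  (PySem.List.enumerate s).foldl
    (fun (st : Int × Int) (p : Int × Int) =>
      let count : Int := (PySem.List.bisectLeft s (p.2 + window) : Int) - p.1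
      if count > st.2 then (p.2, count) else st)
    (best_start, -1)

-- ===== PRECONDITION & SPEC =====
-- frames[0] raises IndexError on the empty list in both A and B
def Pre_best_window_py (frames : List Int) (window : Int) : Prop := frames ≠ []
instance (frames : List Int) (window : Int) : Decidable (Pre_best_window_py frames window) := by unfold Pre_best_window_py; infer_instance
def pvWitness_best_window_py : List Int × Int := ([3, 1, 4, 1, 5], 2)

def Spec_best_window_py (frames : List Int) (window : Int) (out : Int × Int) : Prop := out = best_window_py_alt frames window
instance (frames : List Int) (window : Int) (out : Int × Int) : Decidable (Spec_best_window_py frames window out) := by unfold Spec_best_window_py; infer_instance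

-- ===== CLAIM (what is proved, stated in full; the proofs are below) =====
def Claim_equal_best_window_py : Prop := ∀ (frames : List Int) (window : Int), Dom_best_window_py frames window → Pre_best_window_py frames window → Spec_best_window_py frames window (best_window_py frames window)

-- ===== LEMMAS AND PROOFS =====

-- bisectLeft is monotone in the query on a sorted list
theorem pv_bisect_mono (s : List Int) (hs : s.Pairwise (· ≤ ·)) {x y : Int} (hxy : x ≤ y) :
    PySem.List.bisectLeft s x ≤ PySem.List.bisectLeft s y := by
  obtain ⟨hxlen, hxlt, _⟩ := PySem.List.bisectLeft_spec s x hs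
  obtain ⟨hylen, _, hyge⟩ := PySem.List.bisectLeft_spec s y hs
  by_contra hlt
  replace hlt := Nat.lt_of_not_le hlt
  have hj : PySem.List.bisectLeft s y < s.length := lt_of_lt_of_le hlt hxlen
  have h1 := hxlt _ hj hlt
  have h2 := hyge _ hj (le_refl _)
  omega

-- the inner while loop lands exactly on bisectLeft, for any start ≤ bisectLeft
theorem pv_advance_eq (s : List Int) (hs : s.Pairwise (· ≤ ·)) (thr : Int) (j : Nat)
    (hj : j ≤ PySem.List.bisectLeft s thr) :
    pvAdvance s thr j = PySem.List.bisectLeft s thr := by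
  obtain ⟨hlen, hlt, hge⟩ := PySem.List.bisectLeft_spec s thr hs
  rcases eq_or_lt_of_le hj with heq | hlt'
  · rw [pvAdvance, dif_neg]
    · exact heq
    rintro ⟨h1, h2⟩
    rw [List.getElem!_eq_getElem?_getD, List.getElem?_eq_getElem h1, Option.getD_some] at h2
    have := hge j h1 (le_of_eq heq.symm)
    omega
  · have hjl : j < s.length := lt_of_lt_of_le hlt' hlen
    rw [pvAdvance, dif_pos]
    · exact pv_advance_eq s hs thr (j + 1) hlt'
    refine ⟨hjl, ?_⟩
    rw [List.getElem!_eq_getElem?_getD, List.getElem?_eq_getElem hjl, Option.getD_some]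
    exact hlt j hjl hlt'
  termination_by s.length - j
  decreasing_by omega

-- the two folds agree whenever the pair values are ordered and j starts below the first bisect point
theorem pv_fold_eq (s : List Int) (hs : s.Pairwise (· ≤ ·)) (window : Int)
    (ps : List (Int × Int)) (hc : ps.Pairwise (fun a b => a.2 ≤ b.2))
    (bs bc : Int) (j : Nat)
    (hj : ∀ h : ps ≠ [], j ≤ PySem.List.bisectLeft s ((ps.head h).2 + window)) :
    (ps.foldl
      (fun (st : Int × Int × Nat) (p : Int × Int) =>
        let j := pvAdvance s (p.2 + window) st.2.2
        let count : Int := (j : Int) - p.1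
        if count > st.2.1 then (p.2, count, j) else (st.1, st.2.1, j))
      (bs, bc, j)).1 = (ps.foldl
      (fun (st : Int × Int) (p : Int × Int) =>
        let count : Int := (PySem.List.bisectLeft s (p.2 + window) : Int) - p.1
        if count > st.2 then (p.2, count) else st)
      (bs, bc)).1 ∧
    (ps.foldl
      (fun (st : Int × Int × Nat) (p : Int × Int) =>
        let j := pvAdvance s (p.2 + window) st.2.2
        let count : Int := (j : Int) - p.1
        if count > st.2.1 then (p.2, count, j) else (st.1, st.2.1, j))
      (bs, bc, j)).2.1 = (ps.foldl
      (fun (st : Int × Int) (p : Int × Int) =>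
        let count : Int := (PySem.List.bisectLeft s (p.2 + window) : Int) - p.1
        if count > st.2 then (p.2, count) else st)
      (bs, bc)).2 := by
  induction ps generalizing bs bc j with
  | nil => exact ⟨rfl, rfl⟩
  | cons p rest ih =>
    have hadv : pvAdvance s (p.2 + window) j = PySem.List.bisectLeft s (p.2 + window) :=
      pv_advance_eq s hs _ j (hj (by simp))
    have hc' : rest.Pairwise (fun a b => a.2 ≤ b.2) := (List.pairwise_cons.mp hc).2
    have hj' : ∀ h : rest ≠ [], PySem.List.bisectLeft s (p.2 + window) ≤
        PySem.List.bisectLeft s ((rest.head h).2 + window) := by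
      intro h
      refine pv_bisect_mono s hs ?_
      have := (List.pairwise_cons.mp hc).1 (rest.head h) (List.head_mem h)
      omega
    simp only [List.foldl_cons, hadv]
    by_cases hcnt : ((PySem.List.bisectLeft s (p.2 + window) : Int) - p.1) > bc
    · rw [if_pos hcnt, if_pos hcnt]
      exact ih hc' p.2 _ _ hj'
    · rw [if_neg hcnt, if_neg hcnt]
      exact ih hc' bs bc _ hj'

-- ===== VERDICT (by name: the statement is the Claim_ definition above) =====
theorem best_window_py_spec : Claim_equal_best_window_py := by
  intro frames window _ _
  unfold Spec_best_window_py best_window_py best_window_py_alt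
  have hs : (PySem.List.sorted frames (fun t => t)).Pairwise (· ≤ ·) :=
    PySem.List.sorted_pairwise frames (fun t => t)
  have h := pv_fold_eq (PySem.List.sorted frames (fun t => t)) hs window
    (PySem.List.enumerate (PySem.List.sorted frames (fun t => t)))
    (List.pairwise_map.mp (by rw [PySem.List.map_snd_enumerate]; exact hs))
    ((PySem.List.pyGet? (PySem.List.sorted frames (fun t => t)) 0).getD 0) (-1) 0
    (fun _ => Nat.zero_le _)
  exact Prod.ext h.1 h.2
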